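-- pv_equiv track=rewrite | github.com/97wfinney/Stax | models/logistic_backtest.py | get_team_names
-- ===== SOURCE A (Python) =====
-- from typing import List, Tuple, Optional, Dict
--
-- def get_team_names(match_name: str, odds_data: dict) -> Tuple[Optional[str], Optional[str]]:
--     if ' vs ' in match_name:
--         teams = match_name.split(' vs ')
--         home_team, away_team = teams[0].strip(), teams[1].strip()
--         if home_team and away_team: return home_team, away_team
--     all_potential_teams = {k.strip() for d in odds_data.values() for k in d if isinstance(k, str) and k.strip().lower() != 'draw'}
--     sorted_teams = sorted(list(all_potential_teams))
--     if len(sorted_teams) >= 2: return sorted_teams[0], sorted_teams[1]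
--     return None, None
-- ===== SOURCE B (Python) =====
-- def get_team_names(match_name, odds_data):
--     if ' vs ' in match_name:
--         teams = match_name.split(' vs ')
--         home_team, away_team = teams[0].strip(), teams[1].strip()
--         if home_team and away_team:
--             return home_team, away_team
--     # One pass over the candidate keys keeping the two smallest distinct
--     # stripped names; no set and no sort.
--     lo = hi = None
--     for d in odds_data.values():
--         for k in d:
--             if not isinstance(k, str):
--                 continue
--             t = k.strip()
--             if t.lower() == 'draw':
--                 continue
--             if lo is None:
--                 lo = t
--             elif t < lo:
--                 hi = lo
--                 lo = t
--             elif t > lo and (hi is None or t < hi):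
--                 hi = t
--     if hi is None:
--         return None, None
--     return lo, hi
-- ===== Notes on version B (the rewrite author's own statement) =====
-- stated objective: alternative
-- what changed: The fallback no longer builds a set and sorts it: B does a single pass over the candidate keys maintaining the two lexicographically smallest distinct stripped names, returning (None, None) when fewer than two distinct names exist.
import Mathlib
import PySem

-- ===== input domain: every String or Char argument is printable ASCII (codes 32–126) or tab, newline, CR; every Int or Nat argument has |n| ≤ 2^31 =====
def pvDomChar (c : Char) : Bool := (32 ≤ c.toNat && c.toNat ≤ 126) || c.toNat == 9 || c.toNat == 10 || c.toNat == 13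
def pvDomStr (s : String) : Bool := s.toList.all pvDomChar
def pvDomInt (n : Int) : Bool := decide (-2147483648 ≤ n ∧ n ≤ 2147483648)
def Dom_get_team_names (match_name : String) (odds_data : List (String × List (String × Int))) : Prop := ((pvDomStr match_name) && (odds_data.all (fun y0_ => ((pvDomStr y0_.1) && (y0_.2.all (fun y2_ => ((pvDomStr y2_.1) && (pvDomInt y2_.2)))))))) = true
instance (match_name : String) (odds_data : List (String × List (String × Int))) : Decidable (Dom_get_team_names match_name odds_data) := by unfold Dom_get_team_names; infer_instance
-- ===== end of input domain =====

-- B replaces A's build-a-set-then-sort fallback by a single scan of the candidate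
-- names keeping the two lexicographically smallest distinct ones (alternative algorithm).

-- ===== PORT A =====
-- the fallback: {k.strip() for d in odds_data.values() for k in d if ...}, sorted, first two
def gtnFallback (odds_data : List (String × List (String × Int))) : Option String × Option String :=
  let stream := ((PySem.Dict.ofList odds_data).values.flatMap (fun d => (PySem.Dict.ofList d).keys))
  let all_potential_teams : PySem.Set String :=
    PySem.Set.ofList ((stream.filter (fun k => !(PySem.Str.lower (PySem.Str.strip k) == "draw"))).map PySem.Str.strip)
  let sorted_teams := PySem.List.sorted all_potential_teams (fun x => x) false
  if 2 ≤ sorted_teams.length then (PySem.List.pyGet? sorted_teams 0, PySem.List.pyGet? sorted_teams 1)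
  else (none, none)

def get_team_names (match_name : String) (odds_data : List (String × List (String × Int))) : Option String × Option String :=
  if PySem.Str.isIn " vs " match_name then
    let teams := (PySem.Str.split? match_name " vs ").getD []
    -- ' vs ' occurs in match_name, so teams has ≥ 2 pieces: the defaults are never used
    let home_team := PySem.Str.strip (PySem.List.pyGetD teams 0 "")
    let away_team := PySem.Str.strip (PySem.List.pyGetD teams 1 "")
    if home_team ≠ "" ∧ away_team ≠ "" then (some home_team, some away_team)
    else gtnFallback odds_data
  else gtnFallback odds_data

-- ===== PORT B =====
-- one step of B's scan: strip, skip 'draw', update the two running minima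
def twoMinStep (st : Option String × Option String) (k : String) : Option String × Option String :=
  let t := PySem.Str.strip k
  if PySem.Str.lower t = "draw" then st
  else
    match st with
    | (none, hi) => (some t, hi)
    | (some lo, hi) =>
      if t < lo then (some t, some lo)
      else if lo < t then
        match hi with
        | none => (some lo, some t)
        | some h => if t < h then (some lo, some t) else (some lo, some h)
      else (some lo, hi)

def gtnScan (odds_data : List (String × List (String × Int))) : Option String × Option String :=
  let st := (PySem.Dict.ofList odds_data).values.foldl
      (fun st d => ((PySem.Dict.ofList d).keys).foldl twoMinStep st) (none, none)
  match st with
  | (_, none) => (none, none)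
  | (lo, some h) => (lo, some h)

def get_team_names_alt (match_name : String) (odds_data : List (String × List (String × Int))) : Option String × Option String :=
  if PySem.Str.isIn " vs " match_name then
    let teams := (PySem.Str.split? match_name " vs ").getD []
    let home_team := PySem.Str.strip (PySem.List.pyGetD teams 0 "")
    let away_team := PySem.Str.strip (PySem.List.pyGetD teams 1 "")
    if home_team ≠ "" ∧ away_team ≠ "" then (some home_team, some away_team)
    else gtnScan odds_data
  else gtnScan odds_data

-- ===== PRECONDITION & SPEC =====
def Spec_get_team_names (match_name : String) (odds_data : List (String × List (String × Int))) (out : Option String × Option String) : Prop := out = get_team_names_alt match_name odds_data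
instance (match_name : String) (odds_data : List (String × List (String × Int))) (out : Option String × Option String) : Decidable (Spec_get_team_names match_name odds_data out) := by unfold Spec_get_team_names; infer_instance

-- ===== CLAIM (what is proved, stated in full; the proofs are below) =====
def Claim_equal_get_team_names : Prop := ∀ (match_name : String) (odds_data : List (String × List (String × Int))), Dom_get_team_names match_name odds_data → Spec_get_team_names match_name odds_data (get_team_names match_name odds_data)

-- ===== LEMMAS AND PROOFS =====

-- the pure two-minima step, on already stripped, non-'draw' names
def tm (st : Option String × Option String) (t : String) : Option String × Option String :=
  match st with
  | (none, hi) => (some t, hi)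
  | (some lo, hi) =>
    if t < lo then (some t, some lo)
    else if lo < t then
      match hi with
      | none => (some lo, some t)
      | some h => if t < h then (some lo, some t) else (some lo, some h)
    else (some lo, hi)

theorem twoMinStep_eq (st : Option String × Option String) (k : String) :
    twoMinStep st k =
      if PySem.Str.lower (PySem.Str.strip k) = "draw" then st
      else tm st (PySem.Str.strip k) := by
  obtain ⟨lo, hi⟩ := st
  unfold twoMinStep tm
  split
  · rfl
  · cases lo <;> rfl

theorem foldl_twoMinStep_eq (l : List String) (st : Option String × Option String) :
    l.foldl twoMinStep st =
      ((l.filter (fun k => !(PySem.Str.lower (PySem.Str.strip k) == "draw"))).map PySem.Str.strip).foldl tm st := by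
  induction l generalizing st with
  | nil => simp only [List.foldl_nil, List.filter_nil, List.map_nil]
  | cons k l ih =>
    rw [List.foldl_cons, twoMinStep_eq, ih]
    by_cases h : PySem.Str.lower (PySem.Str.strip k) = "draw"
    · rw [if_pos h, List.filter_cons, if_neg (by simp [h])]
    · rw [if_neg h, List.filter_cons, if_pos (by simp [h]), List.map_cons, List.foldl_cons]

theorem foldl_foldl_flatMap (ds : List (List (String × Int))) (st : Option String × Option String) :
    ds.foldl (fun st d => ((PySem.Dict.ofList d).keys).foldl twoMinStep st) st =
      (ds.flatMap (fun d => (PySem.Dict.ofList d).keys)).foldl twoMinStep st := by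
  induction ds generalizing st with
  | nil => rfl
  | cons d ds ih => rw [List.foldl_cons, ih, List.flatMap_cons, List.foldl_append]

-- abbreviation for the insertion step underlying PySem.List.sorted (key = id)
def insStr (x : String) (ss : List String) : List String :=
  PySem.List.insertBy (fun a b => decide (a < b)) x ss

theorem insStr_nil (x : String) : insStr x [] = [x] := rfl

theorem insStr_cons (x a : String) (t : List String) :
    insStr x (a :: t) = if x < a then x :: a :: t else a :: insStr x t := by
  simp [insStr, PySem.List.insertBy]

theorem tm_insert (ss : List String) (x : String) (hx : x ∉ ss) :
    tm (ss[0]?, ss[1]?) x = ((insStr x ss)[0]?, (insStr x ss)[1]?) := by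
  match ss with
  | [] => rfl
  | [a] =>
    have hxa : x ≠ a := by simpa using hx
    rcases lt_trichotomy x a with h | h | h
    · simp [tm, insStr_cons, h]
    · exact absurd h hxa
    · simp [tm, insStr_cons, insStr_nil, h, not_lt_of_gt h]
  | a :: b :: t =>
    have hxa : x ≠ a := by simp at hx; tauto
    have hxb : x ≠ b := by simp at hx; tauto
    rcases lt_trichotomy x a with h | h | h
    · simp [tm, insStr_cons, h]
    · exact absurd h hxa
    · rcases lt_trichotomy x b with h2 | h2 | h2
      · simp [tm, insStr_cons, h, h2, not_lt_of_gt h]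
      · exact absurd h2 hxb
      · simp [tm, insStr_cons, h, not_lt_of_gt h, not_lt_of_gt h2]

theorem tm_mem (ss : List String) (x : String) (hs : ss.Pairwise (· < ·)) (hx : x ∈ ss) :
    tm (ss[0]?, ss[1]?) x = (ss[0]?, ss[1]?) := by
  match ss with
  | [] => simp at hx
  | [a] =>
    have hxa : x = a := by simpa using hx
    subst hxa
    simp [tm]
  | a :: b :: t =>
    rcases List.mem_cons.mp hx with rfl | hx2
    · simp [tm]
    · have hax : a < x := (List.pairwise_cons.mp hs).1 x hx2
      rcases List.mem_cons.mp hx2 with rfl | hx3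
      · simp [tm, not_lt_of_gt hax, hax]
      · have hbx : b < x :=
          (List.pairwise_cons.mp (List.pairwise_cons.mp hs).2).1 x hx3
        simp [tm, not_lt_of_gt hax, hax, not_lt_of_gt hbx]

theorem sorted_append_singleton (s : List String) (x : String) :
    PySem.List.sorted (s ++ [x]) (fun y => y) false =
      insStr x (PySem.List.sorted s (fun y => y) false) := by
  rw [PySem.List.sorted_eq_foldl_insertBy, PySem.List.sorted_eq_foldl_insertBy,
    List.foldl_append]
  rfl

theorem ofList_append_singleton (l : List String) (x : String) :
    PySem.Set.ofList (l ++ [x]) = PySem.Set.add (PySem.Set.ofList l) x := by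
  rw [PySem.Set.ofList_eq_foldl, PySem.Set.ofList_eq_foldl, List.foldl_append]
  rfl

theorem foldl_tm_sorted (l : List String) :
    l.foldl tm (none, none) =
      ((PySem.List.sorted (PySem.Set.ofList l) (fun x => x) false)[0]?,
       (PySem.List.sorted (PySem.Set.ofList l) (fun x => x) false)[1]?) := by
  induction l using List.reverseRecOn with
  | nil => rfl
  | append_singleton l x ih =>
    rw [List.foldl_append, List.foldl_cons, List.foldl_nil, ih, ofList_append_singleton]
    by_cases hm : x ∈ PySem.Set.ofList l
    · rw [PySem.Set.add_of_mem hm]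
      exact tm_mem _ _ (PySem.List.sorted_ofList_pairwise_lt l)
        ((PySem.List.mem_sorted _ _ _ _).mpr hm)
    · rw [PySem.Set.add_of_not_mem hm, sorted_append_singleton]
      exact tm_insert _ _ (fun hc => hm ((PySem.List.mem_sorted _ _ _ _).mp hc))

theorem fallback_eq (odds_data : List (String × List (String × Int))) :
    gtnFallback odds_data = gtnScan odds_data := by
  simp only [gtnFallback, gtnScan]
  rw [foldl_foldl_flatMap, foldl_twoMinStep_eq, foldl_tm_sorted]
  cases hs : PySem.List.sorted (PySem.Set.ofList
      ((((PySem.Dict.ofList odds_data).values.flatMap (fun d => (PySem.Dict.ofList d).keys)).filter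
        (fun k => !(PySem.Str.lower (PySem.Str.strip k) == "draw"))).map PySem.Str.strip))
      (fun x => x) false with
  | nil => simp
  | cons a t =>
    cases t with
    | nil => simp
    | cons b t =>
      have h2 : 2 ≤ (a :: b :: t).length := by simp
      rw [if_pos h2, show (0 : Int) = ((0 : Nat) : Int) from rfl,
        show (1 : Int) = ((1 : Nat) : Int) from rfl,
        PySem.List.pyGet?_natCast, PySem.List.pyGet?_natCast]
      rfl

-- ===== VERDICT (by name: the statement is the Claim_ definition above) =====
theorem get_team_names_spec : Claim_equal_get_team_names := by
  intro match_name odds_data _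
  unfold Spec_get_team_names get_team_names get_team_names_alt
  rw [fallback_eq]
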